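-- pv_equiv track=rewrite | github.com/variability2026-submission/replication-package | fca_core.py | prime_attributes
-- ===== SOURCE A (Python) =====
-- from typing import Dict, FrozenSet, Set, Tuple
--
-- Context = Dict[str, Set[str]]
--
-- def prime_attributes(context: Context, objects: Set[str]) -> Set[str]:
--     """B' -- attributes shared by ALL objects in B."""
--     if not objects:
--         # Convention: empty object set → union of all attributes
--         return set().union(*context.values()) if context else set()
--     result: Set[str] | None = None
--     for obj in objects:
--         if result is None:
--             result = context[obj].copy()
--         else:
--             result &= context[obj]
--     return result if result is not None else set()
-- ===== SOURCE B (Python) =====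
-- def prime_attributes(context, objects):
--     """B' -- attributes shared by ALL objects in B (tally-then-filter)."""
--     if not objects:
--         return set().union(*context.values()) if context else set()
--     counts = {}
--     for obj in objects:
--         for a in context[obj]:
--             counts[a] = counts.get(a, 0) + 1
--     n = len(objects)
--     return {a for a, c in counts.items() if c == n}
-- ===== Notes on version B (the rewrite author's own statement) =====
-- stated objective: alternative
-- what changed: A intersects the objects' attribute sets progressively into an Optional accumulator; B makes one tally pass building a dict that counts, per attribute, how many objects carry it, then returns the attributes whose count equals len(objects).
-- outside the precondition, e.g. on prime_attributes({'a': ['x', 'x']}, {'a'}): A returns {'x'}, B returns set()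
import Mathlib
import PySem

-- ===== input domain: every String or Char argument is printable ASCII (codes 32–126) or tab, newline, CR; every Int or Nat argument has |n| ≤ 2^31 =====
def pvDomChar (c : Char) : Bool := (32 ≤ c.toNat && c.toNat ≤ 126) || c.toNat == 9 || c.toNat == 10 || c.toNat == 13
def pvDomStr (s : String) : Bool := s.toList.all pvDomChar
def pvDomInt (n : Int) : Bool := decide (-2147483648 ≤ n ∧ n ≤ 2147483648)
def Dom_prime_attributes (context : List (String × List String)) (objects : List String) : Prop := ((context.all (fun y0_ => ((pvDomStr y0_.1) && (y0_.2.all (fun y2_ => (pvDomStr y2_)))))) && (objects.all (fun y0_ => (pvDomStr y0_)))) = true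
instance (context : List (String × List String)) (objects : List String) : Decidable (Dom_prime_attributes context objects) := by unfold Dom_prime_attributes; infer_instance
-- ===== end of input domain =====

-- B replaces A's progressive set-intersection accumulator by a single tally pass (a dict counting,
-- for every attribute, how many objects carry it) followed by a filter keeping the attributes whose
-- count equals len(objects); objective: alternative (same cost, different algorithm).

-- ===== PORT A =====
def prime_attributes (context : List (String × List String)) (objects : List String) : List String :=
  if objects.isEmpty then
    (if context.isEmpty then [] else
      context.foldl (fun acc kv => PySem.Set.update acc kv.2) PySem.Set.empty)
  else
    (objects.foldl (fun (result : Option (List String)) obj =>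
        match result with
        | none => some ((PySem.Dict.mk context).getD obj [])
        | some r => some (PySem.Set.inter r ((PySem.Dict.mk context).getD obj []))) none).getD []

-- ===== PORT B =====
def prime_attributes_alt (context : List (String × List String)) (objects : List String) : List String :=
  if objects.isEmpty then
    (if context.isEmpty then [] else
      context.foldl (fun acc kv => PySem.Set.update acc kv.2) PySem.Set.empty)
  else
    PySem.Set.ofList (((objects.foldl
        (fun d obj => ((PySem.Dict.mk context).getD obj []).foldl
          (fun d a => d.insert a (d.getD a 0 + 1)) d) PySem.Dict.empty).items.filter
      (fun p => p.2 == (objects.length : Int))).map (·.1))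

-- ===== PRECONDITION & SPEC =====
-- Pre_ excludes (i) inputs where some object is not a key of context — there A (and B) raise KeyError —
-- and (ii) association lists with a duplicated key or duplicated attributes inside a value list, which do
-- not arise from any Python dict-of-sets input (on such raw lists A returns a list, not a set of the type).
def Pre_prime_attributes (context : List (String × List String)) (objects : List String) : Prop :=
  (context.map (·.1)).Nodup ∧ (∀ kv ∈ context, kv.2.Nodup) ∧
    (∀ obj ∈ objects, (PySem.Dict.mk context).contains obj = true)
instance (context : List (String × List String)) (objects : List String) : Decidable (Pre_prime_attributes context objects) := by unfold Pre_prime_attributes; infer_instance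

def pvWitness_prime_attributes : (List (String × List String)) × List String :=
  ([("a", ["x", "y"]), ("b", ["y", "z"])], ["a", "b"])

def Spec_prime_attributes (context : List (String × List String)) (objects : List String) (out : List String) : Prop := out = prime_attributes_alt context objects
instance (context : List (String × List String)) (objects : List String) (out : List String) : Decidable (Spec_prime_attributes context objects out) := by unfold Spec_prime_attributes; infer_instance

-- ===== CLAIM (what is proved, stated in full; the proofs are below) =====
def Claim_equal_prime_attributes : Prop := ∀ (context : List (String × List String)) (objects : List String), Dom_prime_attributes context objects → Pre_prime_attributes context objects → Spec_prime_attributes context objects (prime_attributes context objects)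

-- ===== LEMMAS AND PROOFS =====

-- the attribute set of one object, as both ports look it up
def pvCtx (context : List (String × List String)) (obj : String) : List String :=
  (PySem.Dict.mk context).getD obj []

theorem pvCtx_nodup (context : List (String × List String))
    (hv : ∀ kv ∈ context, kv.2.Nodup) (obj : String) : (pvCtx context obj).Nodup := by
  unfold pvCtx PySem.Dict.getD PySem.Dict.get?
  cases h : List.find? (fun p => p.1 == obj) (PySem.Dict.mk context).items with
  | none => simp
  | some p => simpa using hv p (List.mem_of_find?_eq_some h)

-- A's loop after the first object: a running filter by membership in each remaining object's set
theorem pvFoldA (context : List (String × List String)) (os : List String) (r : List String) :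
    os.foldl (fun (result : Option (List String)) obj =>
        match result with
        | none => some ((PySem.Dict.mk context).getD obj [])
        | some r => some (PySem.Set.inter r ((PySem.Dict.mk context).getD obj []))) (some r)
      = some (r.filter (fun a => os.all (fun o => (pvCtx context o).contains a))) := by
  induction os generalizing r with
  | nil => simp
  | cons o' os' ih =>
      simp only [List.foldl_cons]
      rw [ih]
      congr 1
      simp only [PySem.Set.inter, PySem.Set.contains, List.filter_filter, pvCtx]
      apply List.filter_congr
      intro a _
      simp [Bool.and_comm]

-- B's tally loop is the counter of the concatenation of all looked-up attribute lists
theorem pvFoldB (context : List (String × List String)) (objects : List String) :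
    objects.foldl (fun d obj => ((PySem.Dict.mk context).getD obj []).foldl
        (fun d a => d.insert a (d.getD a 0 + 1)) d) PySem.Dict.empty
      = PySem.Dict.counter (objects.flatMap (pvCtx context)) := by
  rw [← PySem.Dict.foldl_insert_getD_add_one_eq_counter, List.foldl_flatMap]
  rfl

-- B's counter value at a: the number of objects whose attribute set contains a
theorem pvCount (context : List (String × List String)) (objects : List String)
    (hv : ∀ kv ∈ context, kv.2.Nodup) (a : String) :
    (objects.flatMap (pvCtx context)).count a
      = objects.countP (fun o => (pvCtx context o).contains a) := by
  rw [List.count_flatMap]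
  induction objects with
  | nil => simp
  | cons o os ih =>
      simp only [List.map_cons, List.sum_cons, List.countP_cons, ih, Function.comp]
      rw [(pvCtx_nodup context hv o).count]
      by_cases h : a ∈ pvCtx context o
      · simp [h]
        omega
      · simp [h]

-- B on a non-empty object list: the first object's attributes, filtered by the full tally test
theorem pvAlt_eq (context : List (String × List String)) (o : String) (os : List String)
    (hv : ∀ kv ∈ context, kv.2.Nodup) :
    prime_attributes_alt context (o :: os)
      = (pvCtx context o).filter
          (fun a => ((o :: os).countP (fun o' => (pvCtx context o').contains a) == (o :: os).length)) := by
  unfold prime_attributes_alt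
  simp only [List.isEmpty_cons, Bool.false_eq_true, if_false]
  rw [pvFoldB, PySem.Dict.items_counter, List.filter_map, List.map_map]
  rw [show ((fun x : String × Int => x.1) ∘ fun k => (k, ((((o :: os).flatMap (pvCtx context)).count k : Nat) : Int))) = id from rfl, List.map_id]
  have hq : ∀ k ∈ PySem.Set.ofList ((o :: os).flatMap (pvCtx context)),
      ((fun p : String × Int => p.2 == ((o :: os).length : Int)) ∘
        fun k => (k, ((((o :: os).flatMap (pvCtx context)).count k : Nat) : Int))) k
      = ((o :: os).countP (fun o' => (pvCtx context o').contains k) == (o :: os).length) := by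
    intro k _
    simp only [Function.comp]
    rw [pvCount context (o :: os) hv k]
    apply Bool.eq_iff_iff.mpr
    simp only [beq_iff_eq]
    omega
  rw [List.filter_congr hq]
  have hnd : ((PySem.Set.ofList ((o :: os).flatMap (pvCtx context))).filter
      (fun k => ((o :: os).countP (fun o' => (pvCtx context o').contains k) == (o :: os).length))).Nodup :=
    (PySem.Set.nodup_ofList _).filter _
  rw [PySem.Set.ofList_eq_self_of_nodup _ hnd]
  rw [show (o :: os).flatMap (pvCtx context) = pvCtx context o ++ os.flatMap (pvCtx context) from rfl]
  rw [PySem.Set.ofList_append, PySem.Set.update_eq_append_filter,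
    PySem.Set.ofList_eq_self_of_nodup _ (pvCtx_nodup context hv o), List.filter_append,
    List.filter_filter]
  have hnil : ((PySem.Set.ofList (os.flatMap (pvCtx context))).filter
      (fun a => ((o :: os).countP (fun o' => (pvCtx context o').contains a) == (o :: os).length)
        && !(PySem.Set.contains (pvCtx context o) a))) = [] := by
    apply List.filter_eq_nil_iff.mpr
    intro a _
    simp only [Bool.and_eq_true, beq_iff_eq, Bool.not_eq_true', not_and, PySem.Set.contains]
    intro hc
    have := List.countP_eq_length.mp hc o (by simp)
    simpa using this
  rw [hnil, List.append_nil]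

theorem prime_attributes_spec : Claim_equal_prime_attributes := by
  intro context objects _ hpre
  obtain ⟨hk, hv, hobj⟩ := hpre
  unfold Spec_prime_attributes
  cases objects with
  | nil => rfl
  | cons o os =>
      rw [pvAlt_eq context o os hv]
      unfold prime_attributes
      simp only [List.isEmpty_cons, Bool.false_eq_true, if_false, List.foldl_cons]
      rw [pvFoldA context os ((PySem.Dict.mk context).getD o [])]
      simp only [Option.getD_some]
      apply List.filter_congr
      intro a ha
      apply Bool.eq_iff_iff.mpr
      simp only [List.all_eq_true, beq_iff_eq, List.countP_eq_length]
      constructor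
      · intro h o' ho'
        rcases List.mem_cons.mp ho' with rfl | hm
        · simpa [pvCtx] using ha
        · exact h o' hm
      · intro h o' ho'
        exact h o' (List.mem_cons_of_mem _ ho')
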